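-- pv_equiv track=rewrite | github.com/elephantmipt/trackio | trackio/ui.py | sort_metrics_by_prefix
-- ===== SOURCE A (Python) =====
-- def sort_metrics_by_prefix(metrics: list[str]) -> list[str]:
--     """
--     Sort metrics by grouping prefixes together.
--     Metrics without prefixes come first, then grouped by prefix.
--
--     Example:
--     Input: ["train/loss", "loss", "train/acc", "val/loss"]
--     Output: ["loss", "train/acc", "train/loss", "val/loss"]
--     """
--     no_prefix = []
--     with_prefix = []
--
--     for metric in metrics:
--         if "/" in metric:
--             with_prefix.append(metric)
--         else:
--             no_prefix.append(metric)
--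
--     no_prefix.sort()
--
--     prefix_groups = {}
--     for metric in with_prefix:
--         prefix = metric.split("/")[0]
--         if prefix not in prefix_groups:
--             prefix_groups[prefix] = []
--         prefix_groups[prefix].append(metric)
--
--     sorted_with_prefix = []
--     for prefix in sorted(prefix_groups.keys()):
--         sorted_with_prefix.extend(sorted(prefix_groups[prefix]))
--
--     return no_prefix + sorted_with_prefix
-- ===== SOURCE B (Python) =====
-- def sort_metrics_by_prefix(metrics: list[str]) -> list[str]:
--     return sorted(metrics, key=lambda m: ("/" in m, m.split("/")[0], m))
-- ===== Notes on version B (the rewrite author's own statement) =====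
-- stated objective: simpler
-- what changed: Replaced A's partition into two lists + dict of per-prefix groups + sorted-key concatenation by a single sorted() call with a (has-slash, prefix, full-name) tuple key.
import Mathlib
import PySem

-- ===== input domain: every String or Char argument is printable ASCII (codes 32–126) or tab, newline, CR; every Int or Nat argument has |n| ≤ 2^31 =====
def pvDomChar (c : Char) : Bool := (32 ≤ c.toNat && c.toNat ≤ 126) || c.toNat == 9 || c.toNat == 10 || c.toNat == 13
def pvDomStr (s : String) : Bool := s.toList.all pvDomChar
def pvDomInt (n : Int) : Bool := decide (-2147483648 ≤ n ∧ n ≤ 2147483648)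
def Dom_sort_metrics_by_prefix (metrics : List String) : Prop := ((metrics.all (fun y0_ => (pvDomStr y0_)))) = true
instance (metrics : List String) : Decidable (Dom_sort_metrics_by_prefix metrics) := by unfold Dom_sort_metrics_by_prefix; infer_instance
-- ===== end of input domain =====

-- B replaces A's partition + dict-of-groups + concatenation by one sorted() call with a
-- (has-slash, prefix, full-name) key (objective: simpler).

-- metric.split("/")[0] — the subexpression both Pythons compute
def pvPfx (m : String) : String :=
  PySem.List.pyGetD ((PySem.Str.split? m "/").getD []) 0 ""

-- ===== PORT A =====
-- A's grouping loop: if prefix not in prefix_groups: prefix_groups[prefix] = []; prefix_groups[prefix].append(metric)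
def pvGroupsA (l : List String) : PySem.Dict String (List String) :=
  l.foldl
    (fun d metric =>
      let p := pvPfx metric
      let d := if d.contains p then d else d.insert p ([] : List String)
      d.modify p [] (fun g => g ++ [metric]))
    PySem.Dict.empty

def sort_metrics_by_prefix (metrics : List String) : List String :=
  let parts := metrics.foldl
    (fun (acc : List String × List String) metric =>
      if PySem.Str.isIn "/" metric then (acc.1, acc.2 ++ [metric])
      else (acc.1 ++ [metric], acc.2)) ([], [])
  let no_prefix := PySem.List.sorted parts.1 (fun x => x)
  let prefix_groups := pvGroupsA parts.2
  let sorted_with_prefix := (PySem.List.sorted prefix_groups.keys (fun x => x)).foldl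
    (fun acc p => acc ++ PySem.List.sorted (prefix_groups.getD p []) (fun x => x)) []
  no_prefix ++ sorted_with_prefix

-- ===== PORT B =====
-- key=lambda m: ("/" in m, m.split("/")[0], m): sorted2 compares "/" in m first, then the (prefix, name) pair
def sort_metrics_by_prefix_alt (metrics : List String) : List String :=
  PySem.List.sorted2 metrics (fun m => PySem.Str.isIn "/" m) (fun m => toLex (pvPfx m, m))

-- ===== PRECONDITION & SPEC =====
def Spec_sort_metrics_by_prefix (metrics : List String) (out : List String) : Prop := out = sort_metrics_by_prefix_alt metrics
instance (metrics : List String) (out : List String) : Decidable (Spec_sort_metrics_by_prefix metrics out) := by unfold Spec_sort_metrics_by_prefix; infer_instance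

-- ===== CLAIM (what is proved, stated in full; the proofs are below) =====
def Claim_equal_sort_metrics_by_prefix : Prop := ∀ (metrics : List String), Dom_sort_metrics_by_prefix metrics → Spec_sort_metrics_by_prefix metrics (sort_metrics_by_prefix metrics)

-- ===== LEMMAS AND PROOFS =====

-- B's full tuple key, as one lexicographic value (proof device)
def pvKeyB (m : String) : Bool ×ₗ (String ×ₗ String) :=
  toLex (PySem.Str.isIn "/" m, toLex (pvPfx m, m))

-- splitting on a character that does not occur returns the whole string as one chunk
theorem pvGo_no_sep (c : Char) (fuel : Nat) (l cur : List Char) (acc : List (List Char))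
    (h : c ∉ l) :
    PySem.Chars.splitOn.go [c] fuel l cur acc = ((cur.reverse ++ l) :: acc).reverse := by
  induction fuel generalizing l cur with
  | zero => simp [PySem.Chars.splitOn.go]
  | succ fuel ih =>
    cases l with
    | nil => simp [PySem.Chars.splitOn.go]
    | cons ch rest =>
      have hne : c ≠ ch := fun hc => h (hc ▸ List.mem_cons_self)
      have hpre : List.isPrefixOf [c] (ch :: rest) = false := by
        simp [List.isPrefixOf, hne]
      rw [PySem.Chars.splitOn.go]
      simp only [hpre, Bool.false_eq_true, if_false]
      rw [ih rest (ch :: cur) (fun hm => h (List.mem_cons_of_mem _ hm))]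
      simp

theorem pvPfx_of_no_slash (m : String) (h : PySem.Str.isIn "/" m = false) : pvPfx m = m := by
  have hsl : ("/" : String).toList = ['/'] := rfl
  have h' : PySem.Chars.isIn ['/'] m.toList = false := by
    have := h
    rw [PySem.Str.isIn] at this
    rwa [hsl] at this
  have hmem : '/' ∉ m.toList := by
    intro hm
    have hinf : ['/'] <:+: m.toList := (List.singleton_infix_iff '/' m.toList).mpr hm
    rw [← PySem.Chars.isIn_iff_infix] at hinf
    rw [h'] at hinf
    exact Bool.false_ne_true hinf
  unfold pvPfx
  rw [PySem.Str.split?]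
  simp only [PySem.Chars.split?, hsl]
  rw [if_neg (by decide)]
  rw [PySem.Chars.splitOn, pvGo_no_sep '/' _ _ _ _ hmem]
  simp [PySem.List.pyGetD_zero_cons, String.ofList_toList]

-- A's partition loop
theorem pvPartition (p : String → Bool) (l : List String) (a b : List String) :
    l.foldl
      (fun (acc : List String × List String) metric =>
        if p metric then (acc.1, acc.2 ++ [metric])
        else (acc.1 ++ [metric], acc.2)) (a, b)
    = (a ++ l.filter (fun m => !p m), b ++ l.filter p) := by
  induction l generalizing a b with
  | nil => simp
  | cons x xs ih =>
    rw [List.foldl_cons]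
    cases hx : p x with
    | false => simp [hx, ih]
    | true => simp [hx, ih]

-- A's conditional-insert-then-append step is one dict modify
theorem pvGroupsA_eq (l : List String) :
    pvGroupsA l
      = l.foldl (fun d m => d.modify (pvPfx m) [] (fun g => g ++ [m])) PySem.Dict.empty := by
  unfold pvGroupsA
  apply PySem.List.foldl_congr_mem
  intro d m _
  by_cases hc : d.contains (pvPfx m) = true
  · simp [hc]
  · simp only [hc, Bool.false_eq_true, if_false]
    simp only [PySem.Dict.modify, PySem.Dict.insert_insert_self,
      PySem.Dict.getD_insert_self,
      PySem.Dict.getD_of_not_contains d _ (by simpa using hc)]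

theorem pvGroupsA_getD (l : List String) (k : String) :
    (pvGroupsA l).getD k [] = l.filter (fun m => pvPfx m == k) := by
  rw [pvGroupsA_eq]
  have : l.foldl (fun d m => d.modify (pvPfx m) [] (fun g => g ++ [m])) PySem.Dict.empty
      = (l.map (fun m => (pvPfx m, m))).foldl
          (fun d p => d.modify p.1 [] (fun g => g ++ [p.2])) PySem.Dict.empty := by
    rw [List.foldl_map]
  rw [this, PySem.Dict.getD_foldl_modify_append, PySem.Dict.getD_empty]
  simp [List.filter_map, Function.comp_def, List.map_map]

theorem pvGroupsA_keys (l : List String) :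
    (pvGroupsA l).keys = PySem.Set.ofList (l.map pvPfx) := by
  rw [pvGroupsA_eq]
  rw [PySem.Dict.keys_foldl_modify_key l pvPfx [] (fun _ m => fun g => g ++ [m])]
  rw [PySem.Dict.keys_empty, PySem.Set.update_nil_left]

-- counting helper for the flat-map permutation
theorem pvSum_ite (p : String) (c : Nat) (keys : List String) (hnd : keys.Nodup) :
    (keys.map (fun k => if p = k then c else 0)).sum = if p ∈ keys then c else 0 := by
  induction keys with
  | nil => simp
  | cons k ks ih =>
    rcases List.nodup_cons.mp hnd with ⟨hk, hks⟩
    by_cases hp : p = k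
    · subst hp
      simp [hk, ih hks]
    · simp [hp, ih hks, List.mem_cons]

-- concatenating the per-prefix groups in any duplicate-free key order is a permutation
theorem pvFlatMap_perm (keys l : List String) (hnd : keys.Nodup)
    (hall : ∀ m ∈ l, pvPfx m ∈ keys) :
    (keys.flatMap (fun k => l.filter (fun m => pvPfx m == k))).Perm l := by
  rw [List.perm_iff_count]
  intro x
  rw [List.count_flatMap]
  have hcf : ∀ k, (List.count x ∘ fun k => l.filter (fun m => pvPfx m == k)) k
      = if pvPfx x = k then l.count x else 0 := by
    intro k
    simp only [Function.comp]
    by_cases hpk : pvPfx x = k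
    · rw [if_pos hpk, List.count_filter (by simp [hpk])]
    · rw [if_neg hpk, List.count_eq_zero]
      intro hx
      exact hpk (by simpa using List.of_mem_filter hx)
  calc (keys.map (List.count x ∘ fun k => l.filter (fun m => pvPfx m == k))).sum
      = (keys.map (fun k => if pvPfx x = k then l.count x else 0)).sum := by
        exact congrArg List.sum (List.map_congr_left (fun k _ => hcf k))
    _ = if pvPfx x ∈ keys then l.count x else 0 := pvSum_ite _ _ _ hnd
    _ = l.count x := by
        by_cases hx : x ∈ l
        · simp [hall x hx]
        · have : l.count x = 0 := List.count_eq_zero.mpr hx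
          simp [this]

-- pairwise order of a flat map over strictly increasing keys
theorem pvPairwise_flatMap (R : String → String → Prop) (keys : List String)
    (g : String → List String) (hks : keys.Pairwise (· < ·))
    (hin : ∀ k ∈ keys, (g k).Pairwise R)
    (hcross : ∀ k k', k < k' → ∀ a ∈ g k, ∀ b ∈ g k', R a b) :
    (keys.flatMap g).Pairwise R := by
  induction keys with
  | nil => simp
  | cons k ks ih =>
    rcases List.pairwise_cons.mp hks with ⟨hk, hks'⟩
    rw [List.flatMap_cons, List.pairwise_append]
    refine ⟨hin k List.mem_cons_self, ih hks' (fun k' hk' => hin k' (List.mem_cons_of_mem _ hk')), ?_⟩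
    intro a ha b hb
    rcases List.mem_flatMap.mp hb with ⟨k', hk', hbk'⟩
    exact hcross k k' (hk k' hk') a ha b hbk'

-- key facts
theorem pvKeyB_no_slash (m : String) (h : PySem.Str.isIn "/" m = false) :
    pvKeyB m = toLex (false, toLex (m, m)) := by
  unfold pvKeyB
  rw [h, pvPfx_of_no_slash m h]

theorem pvKeyB_slash (m : String) (h : PySem.Str.isIn "/" m = true) :
    pvKeyB m = toLex (true, toLex (pvPfx m, m)) := by
  unfold pvKeyB; rw [h]

theorem pvKeyB_injective : Function.Injective pvKeyB := by
  intro a b hab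
  unfold pvKeyB at hab
  have := congrArg (fun x => (ofLex (ofLex x).2).2) hab
  simpa using this

-- the whole A-side list is pairwise ordered by B's key
theorem pvLe_of_no_slash (a b : String) (ha : PySem.Str.isIn "/" a = false)
    (hb : PySem.Str.isIn "/" b = false) (hab : a ≤ b) : pvKeyB a ≤ pvKeyB b := by
  rw [pvKeyB_no_slash a ha, pvKeyB_no_slash b hb]
  rw [Prod.Lex.le_iff]
  rcases lt_or_eq_of_le hab with h | h
  · exact Or.inr ⟨rfl, by rw [Prod.Lex.le_iff]; exact Or.inl h⟩
  · subst h; exact Or.inr ⟨rfl, le_refl _⟩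

theorem pvLe_no_slash_slash (a b : String) (ha : PySem.Str.isIn "/" a = false)
    (hb : PySem.Str.isIn "/" b = true) : pvKeyB a ≤ pvKeyB b := by
  rw [pvKeyB_no_slash a ha, pvKeyB_slash b hb, Prod.Lex.le_iff]
  refine Or.inl ?_
  show (false : Bool) < true
  decide

theorem pvLe_slash (a b : String) (ha : PySem.Str.isIn "/" a = true)
    (hb : PySem.Str.isIn "/" b = true)
    (hp : pvPfx a < pvPfx b ∨ (pvPfx a = pvPfx b ∧ a ≤ b)) : pvKeyB a ≤ pvKeyB b := by
  rw [pvKeyB_slash a ha, pvKeyB_slash b hb, Prod.Lex.le_iff]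
  refine Or.inr ⟨rfl, ?_⟩
  rw [Prod.Lex.le_iff]
  rcases hp with h | ⟨h1, h2⟩
  · exact Or.inl h
  · rcases lt_or_eq_of_le h2 with h | h
    · exact Or.inr ⟨h1, le_of_lt h⟩
    · subst h; exact Or.inr ⟨h1, le_refl _⟩

-- B's two-stage tuple key is A's nested lexicographic key
theorem pvAlt_eq_sorted (metrics : List String) :
    sort_metrics_by_prefix_alt metrics = PySem.List.sorted metrics pvKeyB := by
  unfold sort_metrics_by_prefix_alt
  rw [PySem.List.sorted_eq_foldl_insertBy]
  simp only [PySem.List.sorted2]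
  rw [if_neg (by decide)]
  have hfun : (fun a b => decide (PySem.Str.isIn "/" a < PySem.Str.isIn "/" b) ||
        (!decide (PySem.Str.isIn "/" b < PySem.Str.isIn "/" a) &&
          decide ((toLex (pvPfx a, a) : String ×ₗ String) < toLex (pvPfx b, b))))
      = (fun a b => decide (pvKeyB a < pvKeyB b)) := by
    funext a b
    unfold pvKeyB
    cases ha : PySem.Str.isIn "/" a <;> cases hb : PySem.Str.isIn "/" b <;>
      simp [Prod.Lex.lt_iff]
  rw [hfun]

-- ===== VERDICT (by name: the statement is the Claim_ definition above) =====
theorem sort_metrics_by_prefix_spec : Claim_equal_sort_metrics_by_prefix := by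
  intro metrics _
  unfold Spec_sort_metrics_by_prefix sort_metrics_by_prefix
  rw [pvPartition (fun m => PySem.Str.isIn "/" m) metrics [] []]
  simp only [List.nil_append]
  set np := metrics.filter (fun m => !(PySem.Str.isIn "/" m)) with hnp
  set wp := metrics.filter (fun m => PySem.Str.isIn "/" m) with hwp
  rw [PySem.List.foldl_append_eq_flatMap, List.nil_append]
  set skeys := PySem.List.sorted (pvGroupsA wp).keys (fun x => x) with hskeys
  have hknd : skeys.Nodup := by
    refine (PySem.List.sorted_perm _ _ _).nodup_iff.mpr ?_
    rw [pvGroupsA_keys]; exact PySem.Set.nodup_ofList _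
  have hkmem : ∀ k, k ∈ skeys ↔ k ∈ wp.map pvPfx := by
    intro k
    rw [hskeys, PySem.List.mem_sorted, pvGroupsA_keys, PySem.Set.mem_ofList]
  have hkpw : skeys.Pairwise (· < ·) := by
    have h1 : skeys.Pairwise (· ≤ ·) := PySem.List.sorted_pairwise _ _
    have h2 : skeys.Pairwise (· ≠ ·) := hknd
    exact (h1.and h2).imp (fun ⟨hle, hne⟩ => lt_of_le_of_ne hle hne)
  -- the two sides are permutations of each other
  have hperm : (PySem.List.sorted np (fun x => x) ++
        skeys.flatMap (fun k => PySem.List.sorted ((pvGroupsA wp).getD k []) (fun x => x))).Perm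
      (PySem.List.sorted metrics pvKeyB) := by
    have hstep : ∀ ks : List String,
        (ks.flatMap (fun k => PySem.List.sorted ((pvGroupsA wp).getD k []) (fun x => x))).Perm
          (ks.flatMap (fun k => wp.filter (fun m => pvPfx m == k))) := by
      intro ks
      induction ks with
      | nil => simp
      | cons k ks ih =>
        rw [List.flatMap_cons, List.flatMap_cons]
        refine List.Perm.append ?_ ih
        rw [pvGroupsA_getD]
        exact PySem.List.sorted_perm _ _ _
    have hflat : (skeys.flatMap (fun k => PySem.List.sorted ((pvGroupsA wp).getD k []) (fun x => x))).Perm wp :=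
      (hstep skeys).trans (pvFlatMap_perm skeys wp hknd
        (fun m hm => (hkmem (pvPfx m)).mpr (List.mem_map_of_mem hm)))
    have h1 : (PySem.List.sorted np (fun x => x) ++
        skeys.flatMap (fun k => PySem.List.sorted ((pvGroupsA wp).getD k []) (fun x => x))).Perm
        (np ++ wp) := List.Perm.append (PySem.List.sorted_perm _ _ _) hflat
    have h2 : (np ++ wp).Perm metrics :=
      List.perm_append_comm.trans (List.filter_append_perm (fun m => PySem.Str.isIn "/" m) metrics)
    exact (h1.trans h2).trans (PySem.List.sorted_perm metrics pvKeyB false).symm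
  -- the A-side list is pairwise ordered by B's key
  have hpwA : (PySem.List.sorted np (fun x => x) ++
        skeys.flatMap (fun k => PySem.List.sorted ((pvGroupsA wp).getD k []) (fun x => x))).Pairwise
      (fun a b => pvKeyB a ≤ pvKeyB b) := by
    rw [List.pairwise_append]
    have hnpmem : ∀ m ∈ PySem.List.sorted np (fun x => x), PySem.Str.isIn "/" m = false := by
      intro m hm
      have := (PySem.List.mem_sorted _ _ _ m).mp hm
      have := List.of_mem_filter this
      simpa using this
    have hwpmem : ∀ k, ∀ m ∈ PySem.List.sorted ((pvGroupsA wp).getD k []) (fun x => x),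
        PySem.Str.isIn "/" m = true ∧ pvPfx m = k := by
      intro k m hm
      have hm' := (PySem.List.mem_sorted _ _ _ m).mp hm
      rw [pvGroupsA_getD] at hm'
      refine ⟨?_, by simpa using List.of_mem_filter hm'⟩
      have := List.mem_of_mem_filter hm'
      exact List.of_mem_filter this
    refine ⟨?_, ?_, ?_⟩
    · have hpw := PySem.List.sorted_pairwise np (fun x => x)
      refine List.Pairwise.imp_of_mem ?_ hpw
      intro a b ha hb hab
      exact pvLe_of_no_slash a b (hnpmem a ha) (hnpmem b hb) hab
    · refine pvPairwise_flatMap _ skeys _ hkpw ?_ ?_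
      · intro k _
        have hpw := PySem.List.sorted_pairwise ((pvGroupsA wp).getD k []) (fun x => x)
        refine List.Pairwise.imp_of_mem ?_ hpw
        intro a b ha hb hab
        exact pvLe_slash a b (hwpmem k a ha).1 (hwpmem k b hb).1
          (Or.inr ⟨by rw [(hwpmem k a ha).2, (hwpmem k b hb).2], hab⟩)
      · intro k k' hkk' a ha b hb
        exact pvLe_slash a b (hwpmem k a ha).1 (hwpmem k' b hb).1
          (Or.inl (by rw [(hwpmem k a ha).2, (hwpmem k' b hb).2]; exact hkk'))
    · intro a ha b hb
      rcases List.mem_flatMap.mp hb with ⟨k, _, hbk⟩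
      exact pvLe_no_slash_slash a b (hnpmem a ha) (hwpmem k b hbk).1
  have hpwB : (PySem.List.sorted metrics pvKeyB).Pairwise (fun a b => pvKeyB a ≤ pvKeyB b) :=
    PySem.List.sorted_pairwise metrics pvKeyB
  rw [pvAlt_eq_sorted]
  exact PySem.List.eq_of_perm_of_pairwise_le_of_injective pvKeyB pvKeyB_injective hperm hpwA hpwB
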